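-- pv_equiv track=rewrite | github.com/faisalmc/ai_agents | agents/agent-5/agent5_correlator.py | _worst_status
-- ===== SOURCE A (Python) =====
-- def _worst_status(statuses: list[str]) -> str:
--     # order from best to worst
--     order = ["healthy", "mixed", "degraded", "error", "unknown"]
--     # map for quick rank; unknown treated as worst unless nothing else present
--     rank = {s:i for i,s in enumerate(order)}
--     if not statuses:
--         return "unknown"
--     # if any 'error', return error; else degraded; else mixed; else healthy; else unknown
--     # rely on rank min across mapped statuses (unseen -> unknown)
--     best = None
--     for s in statuses:
--         s2 = s if s in rank else "unknown"
--         if best is None or rank[s2] > rank[best]: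
--             best = s2
--     return best or "unknown"
-- ===== SOURCE B (Python) =====
-- def _worst_status(statuses: list[str]) -> str:
--     order = ["healthy", "mixed", "degraded", "error", "unknown"]
--     known = set(order)
--     present = {s if s in known else "unknown" for s in statuses}
--     for s in reversed(order):
--         if s in present:
--             return s
--     return "unknown"
-- ===== Notes on version B (the rewrite author's own statement) =====
-- stated objective: idiomatic
-- what changed: B builds the set of normalized statuses once and scans the fixed ranking list from worst to best, returning the first rank present, instead of scanning the data while tracking a running-max rank via a dict.
import Mathlib
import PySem

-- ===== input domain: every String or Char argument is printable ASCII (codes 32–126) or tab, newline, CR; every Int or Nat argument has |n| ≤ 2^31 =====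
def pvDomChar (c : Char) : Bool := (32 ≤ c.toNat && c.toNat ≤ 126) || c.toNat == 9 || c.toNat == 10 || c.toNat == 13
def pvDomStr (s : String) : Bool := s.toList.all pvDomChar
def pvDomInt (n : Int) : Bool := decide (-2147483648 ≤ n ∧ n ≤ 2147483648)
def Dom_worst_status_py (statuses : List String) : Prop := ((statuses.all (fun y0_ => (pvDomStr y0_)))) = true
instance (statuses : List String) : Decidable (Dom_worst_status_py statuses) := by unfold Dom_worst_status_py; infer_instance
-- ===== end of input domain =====

-- B rewrites A's running-max scan over the data as: normalize the statuses into a set once,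
-- then scan the fixed ranking list from worst to best and return the first rank present (idiomatic; same cost).

-- ===== PORT A =====
-- order from best to worst
def pvOrderA : List String := ["healthy", "mixed", "degraded", "error", "unknown"]
-- rank = {s:i for i,s in enumerate(order)}
def pvRankA : PySem.Dict String Int :=
  (PySem.List.enumerate pvOrderA).foldl (fun d p => d.insert p.2 p.1) PySem.Dict.empty

def worst_status_py (statuses : List String) : String :=
  if statuses = [] then "unknown"
  else
    let best : Option String := statuses.foldl
      (fun (best : Option String) s =>
        let s2 := if pvRankA.contains s then s else "unknown"
        match best with
        | none => some s2
        | some b => if pvRankA.getD b 0 < pvRankA.getD s2 0 then some s2 else some b)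
      none
    match best with
    | none => "unknown"            -- best or "unknown"
    | some b => if b = "" then "unknown" else b

-- ===== PORT B =====
def worst_status_py_alt (statuses : List String) : String :=
  let order : List String := ["healthy", "mixed", "degraded", "error", "unknown"]
  let known : PySem.Set String := PySem.Set.ofList order
  let present : PySem.Set String :=
    PySem.Set.ofList (statuses.map (fun s => if known.contains s then s else "unknown"))
  match order.reverse.find? (fun s => present.contains s) with
  | some s => s
  | none => "unknown"

-- ===== PRECONDITION & SPEC =====
def Spec_worst_status_py (statuses : List String) (out : String) : Prop := out = worst_status_py_alt statuses
instance (statuses : List String) (out : String) : Decidable (Spec_worst_status_py statuses out) := by unfold Spec_worst_status_py; infer_instance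

-- ===== CLAIM (what is proved, stated in full; the proofs are below) =====
def Claim_equal_worst_status_py : Prop := ∀ (statuses : List String), Dom_worst_status_py statuses → Spec_worst_status_py statuses (worst_status_py statuses)

-- ===== LEMMAS AND PROOFS =====

-- rank of a status (unseen -> 4 = "unknown")
def pvR (s : String) : Nat :=
  if s = "healthy" then 0 else if s = "mixed" then 1 else
  if s = "degraded" then 2 else if s = "error" then 3 else 4

-- the status at a given rank
def pvIdx (k : Nat) : String :=
  if k = 0 then "healthy" else if k = 1 then "mixed" else
  if k = 2 then "degraded" else if k = 3 then "error" else "unknown"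

-- A's loop body, named for the proofs (definitionally equal to the lambda in the port)
def pvStep (best : Option String) (s : String) : Option String :=
  let s2 := if pvRankA.contains s then s else "unknown"
  match best with
  | none => some s2
  | some b => if pvRankA.getD b 0 < pvRankA.getD s2 0 then some s2 else some b

lemma pvR_le (s : String) : pvR s ≤ 4 := by
  unfold pvR; split_ifs <;> omega

lemma pvIdx_ne_empty (k : Nat) : pvIdx k ≠ "" := by
  unfold pvIdx; split_ifs <;> decide

lemma pvIdx_inj {j k : Nat} (hj : j ≤ 4) (hk : k ≤ 4) (h : pvIdx j = pvIdx k) : j = k := by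
  interval_cases j <;> interval_cases k <;> revert h <;> decide

lemma pvNormA (s : String) :
    (if pvRankA.contains s then s else "unknown") = pvIdx (pvR s) := by
  by_cases h0 : s = "healthy"
  · subst h0; decide
  by_cases h1 : s = "mixed"
  · subst h1; decide
  by_cases h2 : s = "degraded"
  · subst h2; decide
  by_cases h3 : s = "error"
  · subst h3; decide
  by_cases h4 : s = "unknown"
  · subst h4; decide
  · have hc : pvRankA.contains s = false := by
      have he : pvRankA = PySem.Dict.mk
          [("healthy", 0), ("mixed", 1), ("degraded", 2), ("error", 3), ("unknown", 4)] := by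
        decide
      rw [he, PySem.Dict.contains_eq_decide_mem_keys]
      simp [h0, h1, h2, h3, h4]
    simp [hc, pvR, pvIdx, h0, h1, h2, h3]

lemma pvNormB (s : String) :
    (if s ∈ pvOrderA then s else "unknown") = pvIdx (pvR s) := by
  by_cases h : s ∈ pvOrderA
  · rw [if_pos h]
    simp only [pvOrderA, List.mem_cons, List.not_mem_nil, or_false] at h
    rcases h with h | h | h | h | h <;> subst h <;> decide
  · rw [if_neg h]
    simp only [pvOrderA, List.mem_cons, List.not_mem_nil, or_false,
      not_or] at h
    obtain ⟨h0, h1, h2, h3, h4⟩ := h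
    simp [pvR, pvIdx, h0, h1, h2, h3]

lemma pvGetD_idx (k : Nat) (hk : k ≤ 4) : pvRankA.getD (pvIdx k) 0 = (k : Int) := by
  interval_cases k <;> decide

lemma pvStep_none (s : String) : pvStep none s = some (pvIdx (pvR s)) := by
  unfold pvStep
  simp only [pvNormA]

lemma pvStep_some (m : Nat) (hm : m ≤ 4) (s : String) :
    pvStep (some (pvIdx m)) s = some (pvIdx (max m (pvR s))) := by
  unfold pvStep
  simp only [pvNormA, pvGetD_idx m hm, pvGetD_idx (pvR s) (pvR_le s)]
  split_ifs with h
  · have : max m (pvR s) = pvR s := by omega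
    rw [this]
  · have : max m (pvR s) = m := by omega
    rw [this]

-- A's loop invariant: starting from some (pvIdx m), the fold tracks the running max rank
lemma pvFoldA (l : List String) : ∀ (m : Nat), m ≤ 4 →
    l.foldl pvStep (some (pvIdx m)) = some (pvIdx (l.foldl (fun m s => max m (pvR s)) m)) := by
  induction l with
  | nil => intro m _; simp
  | cons s rest ih =>
    intro m hm
    rw [List.foldl_cons, List.foldl_cons, pvStep_some m hm s]
    exact ih (max m (pvR s)) (by have := pvR_le s; omega)

lemma pvFoldMax_le_4 (l : List String) : ∀ m : Nat, m ≤ 4 →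
    l.foldl (fun m s => max m (pvR s)) m ≤ 4 := by
  induction l with
  | nil => intro m hm; simpa using hm
  | cons s rest ih =>
    intro m hm
    exact ih (max m (pvR s)) (by have := pvR_le s; omega)

lemma pvFoldMax_le (l : List String) : ∀ m : Nat, m ≤ l.foldl (fun m s => max m (pvR s)) m := by
  induction l with
  | nil => intro m; simp
  | cons s rest ih =>
    intro m
    simpa using le_trans (le_max_left m (pvR s)) (ih (max m (pvR s)))

lemma pvFoldMax_mem_le (l : List String) : ∀ (m : Nat) (t : String), t ∈ l →
    pvR t ≤ l.foldl (fun m s => max m (pvR s)) m := by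
  induction l with
  | nil => intro _ _ h; simp at h
  | cons s rest ih =>
    intro m t ht
    rcases List.mem_cons.mp ht with h | h
    · subst h
      simpa using le_trans (le_max_right m (pvR t)) (pvFoldMax_le rest (max m (pvR t)))
    · simpa using ih (max m (pvR s)) t h

lemma pvFoldMax_attained (l : List String) : ∀ m : Nat,
    l.foldl (fun m s => max m (pvR s)) m = m ∨
    ∃ t ∈ l, pvR t = l.foldl (fun m s => max m (pvR s)) m := by
  induction l with
  | nil => intro m; left; rfl
  | cons s rest ih =>
    intro m
    simp only [List.foldl_cons]
    rcases ih (max m (pvR s)) with h | ⟨t, ht, hr⟩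
    · rcases Nat.le_total m (pvR s) with hle | hle
      · right; exact ⟨s, List.mem_cons_self, by rw [h]; omega⟩
      · left; rw [h]; omega
    · right; exact ⟨t, List.mem_cons_of_mem _ ht, hr⟩

-- membership in B's normalized set, expressed through ranks
lemma pvPresent_mem (statuses : List String) (k : Nat) (hk : k ≤ 4) :
    (PySem.Set.ofList (statuses.map (fun s =>
        if (PySem.Set.ofList pvOrderA).contains s then s else "unknown"))).contains (pvIdx k)
      = true ↔ ∃ t ∈ statuses, pvR t = k := by
  rw [PySem.Set.contains_iff, PySem.Set.mem_ofList]
  simp only [List.mem_map]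
  constructor
  · rintro ⟨t, ht, he⟩
    simp only [PySem.Set.contains_iff, PySem.Set.mem_ofList, pvNormB] at he
    exact ⟨t, ht, pvIdx_inj (pvR_le t) hk he⟩
  · rintro ⟨t, ht, he⟩
    refine ⟨t, ht, ?_⟩
    simp only [PySem.Set.contains_iff, PySem.Set.mem_ofList, pvNormB, he]

-- A's value on a nonempty list is the status at the max rank
lemma pvA_eq (s : String) (rest : List String) :
    worst_status_py (s :: rest)
      = pvIdx (rest.foldl (fun m t => max m (pvR t)) (pvR s)) := by
  unfold worst_status_py
  rw [if_neg (by simp)]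
  show (match (s :: rest).foldl pvStep none with
        | none => "unknown"
        | some b => if b = "" then "unknown" else b) = _
  rw [List.foldl_cons, pvStep_none, pvFoldA rest (pvR s) (pvR_le s)]
  simp only [if_neg (pvIdx_ne_empty _)]

-- B's value is the status at rank M whenever rank M is present and no worse rank is
lemma pvB_eq (statuses : List String) (M : Nat) (hM : M ≤ 4)
    (hin : ∃ t ∈ statuses, pvR t = M) (hbound : ∀ t ∈ statuses, pvR t ≤ M) :
    worst_status_py_alt statuses = pvIdx M := by
  unfold worst_status_py_alt
  show (match List.find? (fun x => (PySem.Set.ofList (statuses.map (fun s =>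
          if (PySem.Set.ofList pvOrderA).contains s then s else "unknown"))).contains x)
          ["unknown", "error", "degraded", "mixed", "healthy"] with
        | some s => s
        | none => "unknown") = pvIdx M
  set P : PySem.Set String := PySem.Set.ofList (statuses.map (fun s =>
      if (PySem.Set.ofList pvOrderA).contains s then s else "unknown")) with hP
  have hpos : P.contains (pvIdx M) = true := (pvPresent_mem statuses M hM).mpr hin
  have hneg : ∀ k : Nat, k ≤ 4 → M < k → P.contains (pvIdx k) = false := by
    intro k hk hMk
    rw [Bool.eq_false_iff]
    intro hc
    rcases (pvPresent_mem statuses k hk).mp hc with ⟨t, ht, hr⟩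
    have := hbound t ht
    omega
  interval_cases M
  · -- M = 0
    have e4 : "unknown" ∉ P := by
      have h := hneg 4 (by omega) (by omega)
      rw [show pvIdx 4 = "unknown" from rfl] at h
      exact fun hm => (Bool.eq_false_iff.mp h) ((PySem.Set.contains_iff P "unknown").mpr hm)
    have e3 : "error" ∉ P := by
      have h := hneg 3 (by omega) (by omega)
      rw [show pvIdx 3 = "error" from rfl] at h
      exact fun hm => (Bool.eq_false_iff.mp h) ((PySem.Set.contains_iff P "error").mpr hm)
    have e2 : "degraded" ∉ P := by
      have h := hneg 2 (by omega) (by omega)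
      rw [show pvIdx 2 = "degraded" from rfl] at h
      exact fun hm => (Bool.eq_false_iff.mp h) ((PySem.Set.contains_iff P "degraded").mpr hm)
    have e1 : "mixed" ∉ P := by
      have h := hneg 1 (by omega) (by omega)
      rw [show pvIdx 1 = "mixed" from rfl] at h
      exact fun hm => (Bool.eq_false_iff.mp h) ((PySem.Set.contains_iff P "mixed").mpr hm)
    have ep : "healthy" ∈ P := by
      rw [show pvIdx 0 = "healthy" from rfl] at hpos
      exact (PySem.Set.contains_iff P "healthy").mp hpos
    rw [List.find?_cons_of_neg (by simp [e4]), List.find?_cons_of_neg (by simp [e3]), List.find?_cons_of_neg (by simp [e2]), List.find?_cons_of_neg (by simp [e1]), List.find?_cons_of_pos (by simp [ep])]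
    rfl
  · -- M = 1
    have e4 : "unknown" ∉ P := by
      have h := hneg 4 (by omega) (by omega)
      rw [show pvIdx 4 = "unknown" from rfl] at h
      exact fun hm => (Bool.eq_false_iff.mp h) ((PySem.Set.contains_iff P "unknown").mpr hm)
    have e3 : "error" ∉ P := by
      have h := hneg 3 (by omega) (by omega)
      rw [show pvIdx 3 = "error" from rfl] at h
      exact fun hm => (Bool.eq_false_iff.mp h) ((PySem.Set.contains_iff P "error").mpr hm)
    have e2 : "degraded" ∉ P := by
      have h := hneg 2 (by omega) (by omega)
      rw [show pvIdx 2 = "degraded" from rfl] at h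
      exact fun hm => (Bool.eq_false_iff.mp h) ((PySem.Set.contains_iff P "degraded").mpr hm)
    have ep : "mixed" ∈ P := by
      rw [show pvIdx 1 = "mixed" from rfl] at hpos
      exact (PySem.Set.contains_iff P "mixed").mp hpos
    rw [List.find?_cons_of_neg (by simp [e4]), List.find?_cons_of_neg (by simp [e3]), List.find?_cons_of_neg (by simp [e2]), List.find?_cons_of_pos (by simp [ep])]
    rfl
  · -- M = 2
    have e4 : "unknown" ∉ P := by
      have h := hneg 4 (by omega) (by omega)
      rw [show pvIdx 4 = "unknown" from rfl] at h
      exact fun hm => (Bool.eq_false_iff.mp h) ((PySem.Set.contains_iff P "unknown").mpr hm)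
    have e3 : "error" ∉ P := by
      have h := hneg 3 (by omega) (by omega)
      rw [show pvIdx 3 = "error" from rfl] at h
      exact fun hm => (Bool.eq_false_iff.mp h) ((PySem.Set.contains_iff P "error").mpr hm)
    have ep : "degraded" ∈ P := by
      rw [show pvIdx 2 = "degraded" from rfl] at hpos
      exact (PySem.Set.contains_iff P "degraded").mp hpos
    rw [List.find?_cons_of_neg (by simp [e4]), List.find?_cons_of_neg (by simp [e3]), List.find?_cons_of_pos (by simp [ep])]
    rfl
  · -- M = 3
    have e4 : "unknown" ∉ P := by
      have h := hneg 4 (by omega) (by omega)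
      rw [show pvIdx 4 = "unknown" from rfl] at h
      exact fun hm => (Bool.eq_false_iff.mp h) ((PySem.Set.contains_iff P "unknown").mpr hm)
    have ep : "error" ∈ P := by
      rw [show pvIdx 3 = "error" from rfl] at hpos
      exact (PySem.Set.contains_iff P "error").mp hpos
    rw [List.find?_cons_of_neg (by simp [e4]), List.find?_cons_of_pos (by simp [ep])]
    rfl
  · -- M = 4
    have ep : "unknown" ∈ P := by
      rw [show pvIdx 4 = "unknown" from rfl] at hpos
      exact (PySem.Set.contains_iff P "unknown").mp hpos
    rw [List.find?_cons_of_pos (by simp [ep])]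
    rfl

lemma pvMain (statuses : List String) :
    worst_status_py statuses = worst_status_py_alt statuses := by
  cases statuses with
  | nil => decide
  | cons s rest =>
    rw [pvA_eq s rest]
    set M : Nat := rest.foldl (fun m t => max m (pvR t)) (pvR s) with hM
    have hM4 : M ≤ 4 := pvFoldMax_le_4 rest (pvR s) (pvR_le s)
    have hatt : ∃ t ∈ s :: rest, pvR t = M := by
      rcases pvFoldMax_attained rest (pvR s) with h | ⟨t, ht, hr⟩
      · exact ⟨s, List.mem_cons_self, by rw [hM, h]⟩
      · exact ⟨t, List.mem_cons_of_mem _ ht, hr⟩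
    have hbound : ∀ t ∈ s :: rest, pvR t ≤ M := by
      intro t ht
      rcases List.mem_cons.mp ht with h | h
      · subst h; rw [hM]; exact pvFoldMax_le rest (pvR t)
      · rw [hM]; exact pvFoldMax_mem_le rest (pvR s) t h
    exact (pvB_eq (s :: rest) M hM4 hatt hbound).symm

-- ===== VERDICT (by name: the statement is the Claim_ definition above) =====
theorem worst_status_py_spec : Claim_equal_worst_status_py := by
  intro statuses _
  exact pvMain statuses
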